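-- pv_equiv track=rewrite | github.com/darkstar/CodingChallenges | ProjectEuler/054/problem.py | rubbish
-- ===== SOURCE A (Python) =====
-- def sortkey(c):
--     values = { "T": 10, "J": 11, "Q": 12, "K": 13, "A": 14 }
--     return values[c] if c in values else int(c)
--
-- def rubbish(cards):
--     vals = list(map(lambda x: sortkey(x[0]), cards))
--     vals.sort()
--     res = 0
--     while len(vals) > 0:
--         res = 20 * res + vals[-1]
--         vals = vals[:-1]
--     return res
-- ===== SOURCE B (Python) =====
-- def sortkey(c):
--     values = { "T": 10, "J": 11, "Q": 12, "K": 13, "A": 14 }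
--     return values[c] if c in values else int(c)
--
-- def rubbish(cards):
--     vals = sorted(sortkey(x[0]) for x in cards)
--     return sum(v * 20**i for i, v in enumerate(vals))
-- ===== Notes on version B (the rewrite author's own statement) =====
-- stated objective: simpler
-- what changed: Replaces A's Horner while-loop that repeatedly takes vals[-1] and reslices vals[:-1] with a single positional power sum, sum(v * 20**i for i, v in enumerate(sorted(vals))); the value-mapping helper is kept.
import Mathlib
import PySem

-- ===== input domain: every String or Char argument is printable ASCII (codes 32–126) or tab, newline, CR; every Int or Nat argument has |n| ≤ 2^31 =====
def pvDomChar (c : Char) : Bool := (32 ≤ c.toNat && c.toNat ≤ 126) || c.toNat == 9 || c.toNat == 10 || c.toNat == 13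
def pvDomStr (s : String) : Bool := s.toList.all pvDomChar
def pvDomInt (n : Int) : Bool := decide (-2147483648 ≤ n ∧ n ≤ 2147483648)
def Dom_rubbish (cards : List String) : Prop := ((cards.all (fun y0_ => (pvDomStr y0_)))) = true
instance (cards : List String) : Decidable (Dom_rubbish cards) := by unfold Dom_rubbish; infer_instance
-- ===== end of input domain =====

-- B replaces A's Horner-style while-loop with repeated list slicing (res = 20*res + vals[-1]; vals = vals[:-1])
-- by a single positional power sum over enumerate(sorted(vals)); objective: simpler (and no repeated slice copies).

-- ===== PORT A =====
def sortkeyA (c : String) : Option Int :=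
  let values : PySem.Dict String Int :=
    PySem.Dict.ofList [("T", 10), ("J", 11), ("Q", 12), ("K", 13), ("A", 14)]
  if values.contains c then values.get? c else PySem.Int.ofStr? c

-- the while-loop of A: res = 20*res + vals[-1]; vals = vals[:-1]
def rubbishLoop (vals : List Int) (res : Int) : Int :=
  if h : vals = [] then res
  else rubbishLoop vals.dropLast (20 * res + vals.getLast h)
termination_by vals.length
decreasing_by
  have := List.length_pos_iff.mpr h
  simp [List.length_dropLast]; omega

def rubbish (cards : List String) : Int :=
  match cards.mapM (fun x => (PySem.Str.pyGet? x 0).bind (fun ch => sortkeyA (String.ofList [ch]))) with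
  | none => 0   -- unreachable under Pre_rubbish: the Python raises here (IndexError / ValueError / KeyError)
  | some vals => rubbishLoop (PySem.List.sorted vals (fun v => v) false) 0

-- ===== PORT B =====
-- Source B keeps A's value-mapping helper 'sortkey' verbatim, so its port reuses sortkeyA.
def rubbish_alt (cards : List String) : Int :=
  match cards.mapM (fun x => (PySem.Str.pyGet? x 0).bind (fun ch => sortkeyA (String.ofList [ch]))) with
  | none => 0   -- unreachable under Pre_rubbish: the Python raises here
  | some vals0 =>
    let vals := PySem.List.sorted vals0 (fun v => v) false
    -- sum(v * 20**i for i, v in enumerate(vals)); enumerate indices are ≥ 0, so 20**i is 20 ^ i.toNat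
    (PySem.List.enumerate vals 0).foldl (fun acc p => acc + p.2 * 20 ^ p.1.toNat) 0

-- ===== PRECONDITION & SPEC =====
-- Pre_ excludes exactly the inputs on which A raises: a card that is the empty string, or whose
-- first character is neither one of T/J/Q/K/A nor a decimal digit (int(card[0]) would raise ValueError).
def Pre_rubbish (cards : List String) : Prop :=
  ∀ c ∈ cards,
    (c.toList.head?.any fun ch =>
      (['T', 'J', 'Q', 'K', 'A'] : List Char).contains ch || ch.isDigit) = true
instance (cards : List String) : Decidable (Pre_rubbish cards) := by unfold Pre_rubbish; infer_instance

def pvWitness_rubbish : List String := ["TS", "9H", "AC", "2D"]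

def Spec_rubbish (cards : List String) (out : Int) : Prop := out = rubbish_alt cards
instance (cards : List String) (out : Int) : Decidable (Spec_rubbish cards out) := by unfold Spec_rubbish; infer_instance

-- ===== CLAIM (what is proved, stated in full; the proofs are below) =====
def Claim_equal_rubbish : Prop := ∀ (cards : List String), Dom_rubbish cards → Pre_rubbish cards → Spec_rubbish cards (rubbish cards)

-- ===== LEMMAS AND PROOFS =====

-- A's Horner loop over any value list equals B's positional power sum (plus the folded-in accumulator).
theorem rubbishLoop_eq_powsum (l : List Int) :
    ∀ res : Int,
      rubbishLoop l res
        = res * 20 ^ l.length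
          + (PySem.List.enumerate l 0).foldl (fun acc p => acc + p.2 * 20 ^ p.1.toNat) 0 := by
  induction l using List.reverseRecOn with
  | nil =>
    intro res
    simp [rubbishLoop, PySem.List.enumerate]
  | append_singleton ys v ih =>
    intro res
    rw [rubbishLoop]
    simp only [List.dropLast_concat, List.getLast_concat,
      List.append_ne_nil_of_right_ne_nil ys (by simp : ([v] : List Int) ≠ []), dite_false]
    rw [ih, PySem.List.enumerate_append, List.foldl_append]
    simp [PySem.List.enumerate, List.length_append, pow_succ]
    ring

theorem rubbish_eq_alt (cards : List String) : rubbish cards = rubbish_alt cards := by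
  unfold rubbish rubbish_alt
  cases cards.mapM (fun x => (PySem.Str.pyGet? x 0).bind (fun ch => sortkeyA (String.ofList [ch]))) with
  | none => rfl
  | some vals =>
    simp only []
    rw [rubbishLoop_eq_powsum]
    simp

-- ===== VERDICT (by name: the statement is the Claim_ definition above) =====
theorem rubbish_spec : Claim_equal_rubbish := by
  intro cards _ _
  unfold Spec_rubbish
  exact rubbish_eq_alt cards
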